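-- pv_equiv track=rewrite | github.com/VictorBravo9er/EnclosingCircle | checker.py | findLowest
-- ===== SOURCE A (Python) =====
-- def findLowest(points):
--     idx = []
--     lowest = points[0]
--     for p in points:
--         if lowest[1] > p[1]:
--             lowest = p
--     for p in range(len(points)):
--         if lowest[1] == points[p][1]:
--             idx.append(points[p])
--     return idx
-- ===== SOURCE B (Python) =====
-- def findLowest(points):
--     lowest = points[0]
--     idx = []
--     for p in points:
--         if p[1] < lowest[1]:
--             lowest = p
--             idx = [p]
--         elif p[1] == lowest[1]:
--             idx.append(p)
--     return idx
-- ===== Notes on version B (the rewrite author's own statement) =====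
-- stated objective: simpler
-- what changed: Replaced A's two sequential scans (find the minimum y, then re-scan by index to collect matches) with one traversal that maintains the running minimum and its collected list together, resetting the list when a strictly lower y appears.
import Mathlib
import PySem

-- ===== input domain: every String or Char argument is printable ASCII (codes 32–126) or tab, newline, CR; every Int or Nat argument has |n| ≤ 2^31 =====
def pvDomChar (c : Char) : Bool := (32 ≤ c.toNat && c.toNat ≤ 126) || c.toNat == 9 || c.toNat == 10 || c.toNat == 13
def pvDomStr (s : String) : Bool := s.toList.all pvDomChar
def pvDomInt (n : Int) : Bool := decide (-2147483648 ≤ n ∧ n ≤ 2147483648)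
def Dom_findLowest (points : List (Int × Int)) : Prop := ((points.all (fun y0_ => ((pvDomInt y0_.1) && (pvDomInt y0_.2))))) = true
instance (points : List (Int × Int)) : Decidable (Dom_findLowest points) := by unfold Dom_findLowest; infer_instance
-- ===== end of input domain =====

-- B replaces A's two sequential scans (min-y pass, then an index re-scan collecting matches)
-- by one traversal maintaining the running minimum together with its collected list (objective: simpler).


-- ===== PORT A =====
-- 'lowest = points[0]' raises IndexError on []: that input is excluded by Pre_; the port returns [] there.
def findLowest (points : List (Int × Int)) : List (Int × Int) :=
  match points with
  | [] => []
  | p0 :: _ =>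
    let lowest := points.foldl (fun lowest p => if lowest.2 > p.2 then p else lowest) p0
    (PySem.List.pyRange 0 points.length 1).foldl
      (fun idx i => if lowest.2 = (PySem.List.pyGetD points i (0, 0)).2
                    then idx ++ [PySem.List.pyGetD points i (0, 0)] else idx) []

-- ===== PORT B =====
def findLowest_alt (points : List (Int × Int)) : List (Int × Int) :=
  match points with
  | [] => []
  | p0 :: _ =>
    (points.foldl
      (fun (st : (Int × Int) × List (Int × Int)) p =>
        if p.2 < st.1.2 then (p, [p])
        else if p.2 = st.1.2 then (st.1, st.2 ++ [p]) else st)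
      (p0, [])).2

-- ===== PRECONDITION & SPEC =====
-- A (and B) raise IndexError on the empty list ('points[0]'); Pre_ excludes exactly that input.
def Pre_findLowest (points : List (Int × Int)) : Prop := points ≠ []
instance (points : List (Int × Int)) : Decidable (Pre_findLowest points) := by unfold Pre_findLowest; infer_instance
def pvWitness_findLowest : (List (Int × Int)) := [(0, 1), (2, 0), (3, 0)]
def Spec_findLowest (points : List (Int × Int)) (out : List (Int × Int)) : Prop := out = findLowest_alt points
instance (points : List (Int × Int)) (out : List (Int × Int)) : Decidable (Spec_findLowest points out) := by unfold Spec_findLowest; infer_instance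

-- ===== CLAIM (what is proved, stated in full; the proofs are below) =====
def Claim_equal_findLowest : Prop := ∀ (points : List (Int × Int)), Dom_findLowest points → Pre_findLowest points → Spec_findLowest points (findLowest points)

-- ===== LEMMAS AND PROOFS =====

-- A's first loop, as a function.
def pvMinA (l : List (Int × Int)) (m : Int × Int) : Int × Int :=
  l.foldl (fun lowest p => if lowest.2 > p.2 then p else lowest) m

lemma pvMinA_nil (m : Int × Int) : pvMinA [] m = m := rfl

lemma pvMinA_cons (p : Int × Int) (t : List (Int × Int)) (m : Int × Int) :
    pvMinA (p :: t) m = pvMinA t (if m.2 > p.2 then p else m) := rfl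

lemma pvMinA_le (l : List (Int × Int)) (m : Int × Int) : (pvMinA l m).2 ≤ m.2 := by
  induction l generalizing m with
  | nil => simp [pvMinA_nil]
  | cons p t ih =>
    rw [pvMinA_cons]
    split_ifs with h
    · exact le_of_lt (lt_of_le_of_lt (ih p) h)
    · exact ih m

-- B's single pass: its state is (running minimum, collected matches of that minimum).
lemma pvB_invariant (l : List (Int × Int)) (m : Int × Int) (acc : List (Int × Int)) :
    l.foldl
      (fun (st : (Int × Int) × List (Int × Int)) p =>
        if p.2 < st.1.2 then (p, [p])
        else if p.2 = st.1.2 then (st.1, st.2 ++ [p]) else st)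
      (m, acc)
    = (pvMinA l m,
       (if (pvMinA l m).2 = m.2 then acc else []) ++ l.filter (fun p => p.2 = (pvMinA l m).2)) := by
  induction l generalizing m acc with
  | nil => simp [pvMinA_nil]
  | cons p t ih =>
    rw [List.foldl_cons, pvMinA_cons]
    rcases lt_trichotomy p.2 m.2 with hlt | heq | hgt
    · have hm : m.2 > p.2 := hlt
      simp only [gt_iff_lt, if_pos hlt]
      rw [ih p [p]]
      have hle := pvMinA_le t p
      have hne : ¬ (pvMinA t p).2 = m.2 := by omega
      have hpe : ((p.2 = (pvMinA t p).2) ↔ ((pvMinA t p).2 = p.2)) := eq_comm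
      simp only [if_neg hne, List.filter_cons]
      by_cases hp : (pvMinA t p).2 = p.2
      · simp [hp]
      · have : ¬ (decide (p.2 = (pvMinA t p).2) = true) := by simp [hpe, hp]
        simp [hp, this]
    · have h1 : ¬ p.2 < m.2 := by omega
      have hm : ¬ m.2 > p.2 := by omega
      simp only [if_pos heq, gt_iff_lt, if_neg h1]
      rw [ih m (acc ++ [p])]
      have hle := pvMinA_le t m
      simp only [List.filter_cons]
      by_cases hmin : (pvMinA t m).2 = m.2
      · have : (decide (p.2 = (pvMinA t m).2) = true) := by simp [hmin, heq]
        simp [hmin, heq]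
      · have : ¬ (decide (p.2 = (pvMinA t m).2) = true) := by
          simp only [decide_eq_true_eq]; omega
        simp [hmin, this]
    · have h1 : ¬ p.2 < m.2 := by omega
      have h2 : ¬ p.2 = m.2 := by omega
      have hm : ¬ m.2 > p.2 := by omega
      simp only [if_neg h2, gt_iff_lt, if_neg h1]
      rw [ih m acc]
      have hle := pvMinA_le t m
      have : ¬ (decide (p.2 = (pvMinA t m).2) = true) := by
        simp only [decide_eq_true_eq]; omega
      simp [this]

-- A's second loop collects exactly the elements whose y equals lowest's y, in order.
lemma pvA_filter (points : List (Int × Int)) (L : Int × Int) :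
    (PySem.List.pyRange 0 points.length 1).foldl
      (fun idx i => if L.2 = (PySem.List.pyGetD points i (0, 0)).2
                    then idx ++ [PySem.List.pyGetD points i (0, 0)] else idx) []
    = points.filter (fun p => L.2 = p.2) := by
  rw [PySem.List.foldl_pyRange_zero_pyGetD' points (0, 0)
      (fun idx q => if L.2 = q.2 then idx ++ [q] else idx) []]
  simp only [PySem.List.foldl_append_ite_eq_filter]
  simp

-- ===== VERDICT (by name: the statement is the Claim_ definition above) =====
theorem findLowest_spec : Claim_equal_findLowest := by
  intro points _ hpre
  unfold Spec_findLowest findLowest findLowest_alt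
  match points with
  | [] => exact absurd rfl hpre
  | p0 :: t =>
    simp only
    have hA := pvA_filter (p0 :: t) (pvMinA (p0 :: t) p0)
    have hB := pvB_invariant (p0 :: t) p0 []
    unfold pvMinA at hA hB
    rw [hA, hB]
    simp only [ite_self, List.nil_append]
    exact List.filter_congr (fun p _ => by simp [eq_comm])
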